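-- pv_equiv track=rewrite | github.com/KristinaNikitenko/y-244Nikitenko | 10/10.9.1.py | find_A_and_max
-- ===== SOURCE A (Python) =====
-- def find_A_and_max(lst, k):
--     A=[]
--     for row in lst:
--         for elem in row:
--             if elem % k==0:
--                 A.append(elem)
--     if A:
--         return len(A), max(A)
--     else:
--         return 0, None
-- ===== SOURCE B (Python) =====
-- def _dc(xs, k):
--     if not xs:
--         return 0, None
--     if len(xs) == 1:
--         return (1, xs[0]) if xs[0] % k == 0 else (0, None)
--     mid = len(xs) // 2
--     c1, m1 = _dc(xs[:mid], k)
--     c2, m2 = _dc(xs[mid:], k)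
--     if m1 is None:
--         m = m2
--     elif m2 is None:
--         m = m1
--     else:
--         m = m1 if m1 >= m2 else m2
--     return c1 + c2, m
--
-- def find_A_and_max(lst, k):
--     flat = [e for row in lst for e in row]
--     return _dc(flat, k)
-- ===== Notes on version B (the rewrite author's own statement) =====
-- stated objective: alternative
-- what changed: Replaces the nested accumulate-then-len/max loops with a divide-and-conquer recursion: flatten once, then recursively split the list in half and merge (count, optional max) pairs from each half.
import Mathlib
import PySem

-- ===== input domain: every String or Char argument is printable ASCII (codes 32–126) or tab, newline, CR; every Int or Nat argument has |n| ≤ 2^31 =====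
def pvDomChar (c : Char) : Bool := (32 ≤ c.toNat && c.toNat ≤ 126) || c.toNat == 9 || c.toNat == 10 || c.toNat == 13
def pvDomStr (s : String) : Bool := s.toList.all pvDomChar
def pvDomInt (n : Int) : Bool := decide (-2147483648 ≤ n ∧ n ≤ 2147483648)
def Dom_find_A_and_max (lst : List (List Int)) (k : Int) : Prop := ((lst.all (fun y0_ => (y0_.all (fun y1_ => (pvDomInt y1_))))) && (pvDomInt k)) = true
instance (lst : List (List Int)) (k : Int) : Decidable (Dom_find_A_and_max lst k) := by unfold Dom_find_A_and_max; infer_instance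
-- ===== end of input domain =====

-- B replaces A's accumulate-matches-then-len/max nested loops with a divide-and-conquer
-- recursion (flatten once, split in half, merge (count, optional max) pairs): alternative.

-- ===== PORT A =====
def find_A_and_max (lst : List (List Int)) (k : Int) : Int × Option Int :=
  let A := lst.foldl (fun acc row =>
    row.foldl (fun acc elem =>
      if PySem.Int.mod elem k == 0 then acc ++ [elem] else acc) acc) []
  if A ≠ [] then ((A.length : Int), PySem.List.max? A (fun x => x))
  else (0, none)

-- ===== PORT B =====
-- merge of the two halves' optional maxima (Source B's if m1 is None / m2 is None / m1>=m2 chain)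
def pvMergeMax (m1 m2 : Option Int) : Option Int :=
  match m1 with
  | none => m2
  | some a =>
    match m2 with
    | none => some a
    | some b => if a ≥ b then some a else some b

-- _dc(xs, k): mid = len(xs)//2 is a nonnegative Nat division (exact for Python's //);
-- xs[:mid] / xs[mid:] with 0 ≤ mid ≤ len are exactly take/drop.
def pvDC (xs : List Int) (k : Int) : Int × Option Int :=
  match xs with
  | [] => (0, none)
  | [x] => if PySem.Int.mod x k == 0 then (1, some x) else (0, none)
  | x :: y :: rest =>
    let mid := (x :: y :: rest).length / 2
    let l := pvDC ((x :: y :: rest).take mid) k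
    let r := pvDC ((x :: y :: rest).drop mid) k
    (l.1 + r.1, pvMergeMax l.2 r.2)
termination_by xs.length
decreasing_by
  · simp [List.length_take]; omega
  · simp [List.length_drop]; omega

def find_A_and_max_alt (lst : List (List Int)) (k : Int) : Int × Option Int :=
  pvDC (lst.flatMap (fun row => row)) k

-- ===== PRECONDITION & SPEC =====
-- Python A raises ZeroDivisionError when k = 0 and some inner element is reached;
-- Pre_ excludes exactly those inputs (k = 0 with a nonempty row).
def Pre_find_A_and_max (lst : List (List Int)) (k : Int) : Prop :=
  k ≠ 0 ∨ ∀ row ∈ lst, row = []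
instance (lst : List (List Int)) (k : Int) : Decidable (Pre_find_A_and_max lst k) := by
  unfold Pre_find_A_and_max; infer_instance
def pvWitness_find_A_and_max : List (List Int) × Int := ([[2, 3], [4]], 2)

def Spec_find_A_and_max (lst : List (List Int)) (k : Int) (out : Int × Option Int) : Prop := out = find_A_and_max_alt lst k
instance (lst : List (List Int)) (k : Int) (out : Int × Option Int) : Decidable (Spec_find_A_and_max lst k out) := by unfold Spec_find_A_and_max; infer_instance

-- ===== CLAIM (what is proved, stated in full; the proofs are below) =====
def Claim_equal_find_A_and_max : Prop := ∀ (lst : List (List Int)) (k : Int), Dom_find_A_and_max lst k → Pre_find_A_and_max lst k → Spec_find_A_and_max lst k (find_A_and_max lst k)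

-- ===== LEMMAS AND PROOFS =====

-- the optional maximum of a list (what both programs' results reduce to)
def pvMaxOpt : List Int → Option Int
  | [] => none
  | x :: t => some (t.foldl max x)

theorem pvFoldl_max_max (s : List Int) (a b : Int) :
    s.foldl max (max a b) = max a (s.foldl max b) := by
  induction s generalizing b with
  | nil => rfl
  | cons y s ih =>
    simp only [List.foldl, max_assoc]
    exact ih (max b y)

theorem pvMaxOpt_append (a b : List Int) :
    pvMaxOpt (a ++ b) = pvMergeMax (pvMaxOpt a) (pvMaxOpt b) := by
  cases a with
  | nil => simp [pvMaxOpt, pvMergeMax]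
  | cons x t =>
    cases b with
    | nil => simp [pvMaxOpt, pvMergeMax]
    | cons y s =>
      simp only [pvMaxOpt, pvMergeMax, List.cons_append, List.foldl_append, List.foldl]
      rw [pvFoldl_max_max]
      rcases le_or_gt (s.foldl max y) (t.foldl max x) with h | h
      · rw [if_pos h, max_eq_left h]
      · rw [if_neg (not_le.mpr h), max_eq_right (le_of_lt h)]

-- pvDC computes the (count, optional max) of the divisible elements.
theorem pvDC_eq (xs : List Int) (k : Int) :
    pvDC xs k = (((xs.filter (fun e => PySem.Int.mod e k == 0)).length : Int),
                 pvMaxOpt (xs.filter (fun e => PySem.Int.mod e k == 0))) := by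
  induction xs using pvDC.induct (k := k) with
  | case1 => simp [pvDC, pvMaxOpt]
  | case2 x h => simp [pvDC, h, List.filter, pvMaxOpt]
  | case3 x h => simp [pvDC, h, List.filter, pvMaxOpt]
  | case4 x y rest mid hl hr =>
    have hmid : mid = (x :: y :: rest).length / 2 := rfl
    rw [hmid] at hl hr
    rw [pvDC]
    rw [hl, hr]
    simp only [Prod.mk.injEq]
    constructor
    · conv_rhs => rw [← List.take_append_drop ((x :: y :: rest).length / 2) (x :: y :: rest),
        List.filter_append, List.length_append]
      push_cast; ring
    · conv_rhs => rw [← List.take_append_drop ((x :: y :: rest).length / 2) (x :: y :: rest),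
        List.filter_append, pvMaxOpt_append]

-- A's list-building double loop flattens to a filter over the concatenated rows.
theorem pvA_matches (lst : List (List Int)) (k : Int) (acc : List Int) :
    lst.foldl (fun acc row =>
      row.foldl (fun acc elem =>
        if PySem.Int.mod elem k == 0 then acc ++ [elem] else acc) acc) acc
    = acc ++ (lst.flatMap (fun row => row)).filter (fun e => PySem.Int.mod e k == 0) := by
  induction lst generalizing acc with
  | nil => simp
  | cons r t ih =>
    simp only [List.foldl, List.flatMap_cons, List.filter_append]
    rw [PySem.List.foldl_append_if_eq_filter, ih, List.append_assoc]

-- ===== VERDICT (by name: the statement is the Claim_ definition above) =====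
theorem find_A_and_max_spec : Claim_equal_find_A_and_max := by
  intro lst k _ _
  show find_A_and_max lst k = find_A_and_max_alt lst k
  unfold find_A_and_max find_A_and_max_alt
  rw [pvA_matches, List.nil_append, pvDC_eq]
  cases h : (lst.flatMap (fun row => row)).filter (fun e => PySem.Int.mod e k == 0) with
  | nil => simp [pvMaxOpt]
  | cons x t =>
    rw [if_pos (by simp), PySem.List.max?_id_cons]
    simp [pvMaxOpt]
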